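-- pv_equiv track=rewrite | github.com/devreplay/review_pattern_gen | generate_rules.py | remove_redundant_symbols
-- ===== SOURCE A (Python) =====
-- def remove_redundant_symbols(code):
--     tokens = []
--     symbol = ""
--     for token in code:
--         start = token[0]
--         if start == symbol and symbol != "*":
--             tokens[-1] = tokens[-1] + " " + token[2:]
--         else:
--             symbol = start
--             tokens.append(token)
--
--     return tokens
-- ===== SOURCE B (Python) =====
-- def remove_redundant_symbols(code):
--     tokens = []
--     i = 0
--     n = len(code)
--     while i < n:
--         key = code[i][0]
--         j = i + 1
--         while j < n and code[j][0] == key: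
--             j += 1
--         if key == "*":
--             tokens.extend(code[i:j])
--         else:
--             merged = code[i]
--             for t in code[i + 1:j]:
--                 merged = merged + " " + t[2:]
--             tokens.append(merged)
--         i = j
--     return tokens
-- ===== Notes on version B (the rewrite author's own statement) =====
-- stated objective: alternative
-- what changed: Replaces A's flat stateful loop (tracking the previous leading symbol and rewriting tokens[-1] in place) with a group-first structure: scan out each maximal run of tokens sharing a leading character, emit '*' runs element-by-element and fold every other run into one merged string.
import Mathlib
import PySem

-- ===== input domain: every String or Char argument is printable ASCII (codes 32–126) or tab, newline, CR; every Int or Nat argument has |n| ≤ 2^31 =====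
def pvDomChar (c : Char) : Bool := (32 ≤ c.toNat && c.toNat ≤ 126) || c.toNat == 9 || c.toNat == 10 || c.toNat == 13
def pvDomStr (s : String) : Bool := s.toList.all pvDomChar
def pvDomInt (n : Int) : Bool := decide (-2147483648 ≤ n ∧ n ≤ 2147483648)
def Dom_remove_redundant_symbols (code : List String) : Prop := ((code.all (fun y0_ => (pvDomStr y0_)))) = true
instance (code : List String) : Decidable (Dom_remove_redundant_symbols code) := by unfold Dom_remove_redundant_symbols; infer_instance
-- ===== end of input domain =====

-- B groups maximal runs of tokens with the same leading character and folds each run, instead of A's flat loop rewriting tokens[-1]; equivalence proved on inputs without empty tokens (A raises IndexError there).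

-- ===== PORT A =====
-- symbol is "" or the 1-char string token[0] in Python; ported as Option Char (none = "").
-- token[0] ported as headD (exact on Pre_, which guarantees nonempty tokens);
-- token[2:] ported as drop 2 on the char list (exact for this nonnegative index).
def rrsStepA (st : List String × Option Char) (token : String) : List String × Option Char :=
  let tokens := st.1
  let symbol := st.2
  let start := token.toList.headD ' '
  if symbol = some start ∧ symbol ≠ some '*' then
    (tokens.dropLast ++ [tokens.getLastD "" ++ " " ++ String.mk (token.toList.drop 2)], symbol)
  else
    (tokens ++ [token], some start)

def remove_redundant_symbols (code : List String) : List String :=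
  (code.foldl rrsStepA ([], none)).1

-- ===== PORT B =====
def rrsFirst (s : String) : Char := s.toList.headD ' '

def rrsMerge (m u : String) : String := m ++ " " ++ String.mk (u.toList.drop 2)

-- Source B's inner run-scan (while code[j][0] == key) is the takeWhile/dropWhile split of the rest.
def rrsGo : List String → List String
  | [] => []
  | t :: rest =>
    let key := rrsFirst t
    let grp := rest.takeWhile (fun u => rrsFirst u == key)
    let rest' := rest.dropWhile (fun u => rrsFirst u == key)
    if key = '*' then (t :: grp) ++ rrsGo rest'
    else grp.foldl rrsMerge t :: rrsGo rest'
termination_by l => l.length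
decreasing_by
  all_goals calc (List.dropWhile (fun u => rrsFirst u == rrsFirst t) rest).length
      ≤ rest.length := (List.dropWhile_sublist _).length_le
    _ < (t :: rest).length := by simp

def remove_redundant_symbols_alt (code : List String) : List String :=
  rrsGo code

-- ===== PRECONDITION & SPEC =====
-- Pre_ excludes exactly the inputs containing an empty token, on which A (and B) raise IndexError at token[0].
def Pre_remove_redundant_symbols (code : List String) : Prop := ∀ s ∈ code, s ≠ ""
instance (code : List String) : Decidable (Pre_remove_redundant_symbols code) := by unfold Pre_remove_redundant_symbols; infer_instance

def pvWitness_remove_redundant_symbols : List String := ["a 1", "a 2", "* x", "* y", "b q"]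

def Spec_remove_redundant_symbols (code : List String) (out : List String) : Prop := out = remove_redundant_symbols_alt code
instance (code : List String) (out : List String) : Decidable (Spec_remove_redundant_symbols code out) := by unfold Spec_remove_redundant_symbols; infer_instance

-- ===== CLAIM (what is proved, stated in full; the proofs are below) =====
def Claim_equal_remove_redundant_symbols : Prop := ∀ (code : List String), Dom_remove_redundant_symbols code → Pre_remove_redundant_symbols code → Spec_remove_redundant_symbols code (remove_redundant_symbols code)

-- ===== LEMMAS AND PROOFS =====

-- A's step only rewrites the last token or appends, so an initial segment of the output passes through the fold.
lemma rrs_shift : ∀ (code : List String) (tokens0 : List String) (cur : String) (sym : Option Char),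
    (code.foldl rrsStepA (tokens0 ++ [cur], sym)).1 = tokens0 ++ (code.foldl rrsStepA ([cur], sym)).1 := by
  intro code
  induction code with
  | nil => intro tokens0 cur sym; simp
  | cons t rest ih =>
    intro tokens0 cur sym
    simp only [List.foldl_cons, rrsStepA]
    by_cases h : sym = some (t.toList.headD ' ') ∧ sym ≠ some '*'
    · simp only [if_pos h, List.dropLast_concat, List.getLastD_concat]
      exact ih tokens0 (cur ++ " " ++ String.mk (t.toList.drop 2)) sym
    · simp only [if_neg h]
      have h1 : tokens0 ++ [cur] ++ [t] = (tokens0 ++ [cur]) ++ [t] := rfl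
      rw [h1, ih (tokens0 ++ [cur]) t, show [cur] ++ [t] = [cur] ++ [t] from rfl,
        ih [cur] t]
      simp

-- rrsGo consumes the maximal '*'-run of its argument elementwise.
lemma rrs_star_unfold (rs : List String) :
    rrsGo rs = rs.takeWhile (fun u => rrsFirst u == '*') ++
      rrsGo (rs.dropWhile (fun u => rrsFirst u == '*')) := by
  cases rs with
  | nil => simp [rrsGo]
  | cons v vs =>
    by_cases hv : rrsFirst v = '*'
    · rw [rrsGo]
      simp [hv, List.takeWhile_cons, List.dropWhile_cons]
    · simp [List.takeWhile_cons, List.dropWhile_cons, hv]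

-- Core correspondence: from state ([cur], some key), A's fold produces B's per-run result.
lemma rrs_key : ∀ (rest : List String) (cur : String) (key : Char),
    (∀ s ∈ rest, s ≠ "") →
    (rest.foldl rrsStepA ([cur], some key)).1 =
      if key = '*' then cur :: rrsGo rest
      else (rest.takeWhile (fun u => rrsFirst u == key)).foldl rrsMerge cur ::
        rrsGo (rest.dropWhile (fun u => rrsFirst u == key)) := by
  intro rest
  induction rest with
  | nil =>
    intro cur key _
    by_cases h : key = '*' <;> simp [rrsGo, h]
  | cons u rs ih =>
    intro cur key hne
    have hu : u ≠ "" := hne u (by simp)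
    have hrs : ∀ s ∈ rs, s ≠ "" := fun s hs => hne s (by simp [hs])
    have hfirst : u.toList.headD ' ' = rrsFirst u := rfl
    simp only [List.foldl_cons, rrsStepA]
    by_cases hk : key = '*'
    · -- symbol is '*': condition fails, fresh start on u
      have hcond : ¬ (some key = some (u.toList.headD ' ') ∧ some key ≠ some '*') := by
        simp [hk]
      simp only [if_neg hcond, if_pos hk]
      rw [rrs_shift rs [cur] u (some (u.toList.headD ' ')), hfirst,
        ih u (rrsFirst u) hrs]
      rw [rrsGo]
      by_cases hu' : rrsFirst u = '*'
      · simp only [if_pos hu', List.cons_append, List.nil_append]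
        rw [rrs_star_unfold rs]
        simp [hu']
      · simp [hu']
    · by_cases hm : rrsFirst u = key
      · -- same leading char: merge branch
        have hcond : (some key = some (u.toList.headD ' ') ∧ some key ≠ some '*') := by
          constructor
          · rw [hfirst, hm]
          · simp [hk]
        simp only [if_pos hcond]
        rw [show (([cur].dropLast ++ [[cur].getLastD "" ++ " " ++ String.mk (u.toList.drop 2)]
            : List String)) = [cur ++ " " ++ String.mk (u.toList.drop 2)] from rfl]
        rw [ih (cur ++ " " ++ String.mk (u.toList.drop 2)) key hrs]
        simp [hk, List.takeWhile_cons, List.dropWhile_cons, hm, rrsMerge]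
      · -- different leading char: fresh start on u
        have hcond : ¬ (some key = some (u.toList.headD ' ') ∧ some key ≠ some '*') := by
          rw [hfirst]
          intro h
          exact hm (Option.some.inj h.1).symm
        simp only [if_neg hcond]
        rw [rrs_shift rs [cur] u (some (u.toList.headD ' ')), hfirst,
          ih u (rrsFirst u) hrs]
        have htw : (u :: rs).takeWhile (fun v => rrsFirst v == key) = [] := by
          simp [List.takeWhile_cons, hm]
        have hdw : (u :: rs).dropWhile (fun v => rrsFirst v == key) = u :: rs := by
          simp [List.dropWhile_cons, hm]
        simp only [if_neg hk, htw, hdw, List.foldl_nil]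
        rw [rrsGo]
        by_cases hu' : rrsFirst u = '*'
        · simp only [if_pos hu', List.cons_append]
          rw [rrs_star_unfold rs]
          simp [hu']
        · simp [hu']

-- ===== VERDICT (by name: the statement is the Claim_ definition above) =====
theorem remove_redundant_symbols_spec : Claim_equal_remove_redundant_symbols := by
  intro code _ hpre
  unfold Spec_remove_redundant_symbols remove_redundant_symbols remove_redundant_symbols_alt
  cases code with
  | nil => simp [rrsGo]
  | cons t rest =>
    have ht : t ≠ "" := hpre t (by simp)
    have hrs : ∀ s ∈ rest, s ≠ "" := fun s hs => hpre s (by simp [hs])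
    simp only [List.foldl_cons, rrsStepA]
    have hcond : ¬ ((none : Option Char) = some (t.toList.headD ' ') ∧
        (none : Option Char) ≠ some '*') := by simp
    simp only [if_neg hcond, List.nil_append]
    rw [rrs_key rest t (t.toList.headD ' ') hrs]
    rw [rrsGo]
    have hfirst : t.toList.headD ' ' = rrsFirst t := rfl
    rw [hfirst]
    by_cases ht' : rrsFirst t = '*'
    · simp only [if_pos ht', List.cons_append]
      rw [rrs_star_unfold rest]
      simp [ht']
    · simp [ht']
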